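-- pv_equiv track=rewrite | github.com/Tianmingla/12306 | DataScript/4_5generate_seats_and_carriages.py | generate_business_seat_numbers
-- ===== SOURCE A (Python) =====
-- from typing import Dict, List, Tuple, Any, Optional
--
-- def generate_business_seat_numbers(total_seats: int) -> List[str]:
--     """
--     生成商务座座位号（3 座排：A-C-F）。
--
--     商务座车厢非常豪华，每节约 60 个座位，排布为 1+2 或 2+1。
--     A/F 靠窗，C 中间。
--     """
--     seats_per_row = 3
--     letter_order = ['A', 'C', 'F']
--
--     seat_numbers = []
--     row = 1
--
--     while len(seat_numbers) < total_seats: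
--         for letter in letter_order:
--             if len(seat_numbers) >= total_seats:
--                 break
--             seat_numbers.append(f"{row:02d}{letter}")
--         row += 1
--
--     return seat_numbers[:total_seats]
-- ===== SOURCE B (Python) =====
-- from typing import List
--
--
-- def generate_business_seat_numbers(total_seats: int) -> List[str]:
--     """Business-class seats computed directly from the flat index:
--     row = i // 3 + 1, letter = letter_order[i % 3]."""
--     letter_order = ['A', 'C', 'F']
--     return [f"{i // 3 + 1:02d}{letter_order[i % 3]}" for i in range(total_seats)]
-- ===== Notes on version B (the rewrite author's own statement) =====
-- stated objective: simpler
-- what changed: Replaced A's while-loop with a mutable row counter, an inner for over the letters and a length re-check with break, by a single comprehension that computes each seat label directly from its flat index via divmod (row = i//3+1, letter = letter_order[i%3]).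
import Mathlib
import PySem

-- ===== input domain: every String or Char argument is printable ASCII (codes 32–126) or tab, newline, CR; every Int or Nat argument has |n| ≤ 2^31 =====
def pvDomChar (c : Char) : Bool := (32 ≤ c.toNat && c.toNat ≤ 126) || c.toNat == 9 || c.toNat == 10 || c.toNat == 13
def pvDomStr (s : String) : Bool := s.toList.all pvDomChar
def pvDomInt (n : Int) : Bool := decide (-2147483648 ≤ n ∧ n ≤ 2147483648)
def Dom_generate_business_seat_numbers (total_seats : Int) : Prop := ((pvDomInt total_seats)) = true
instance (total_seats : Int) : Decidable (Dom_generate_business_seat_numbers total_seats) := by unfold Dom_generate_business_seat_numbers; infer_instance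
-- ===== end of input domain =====

-- B computes each seat label directly from its flat index (divmod) instead of A's
-- row-counter while-loop with an inner break; objective: simpler.

-- f"{row:02d}{letter}" : str(row) zero-padded to width 2, then the letter (shared by both ports)
def pvFmt02 (row : Int) (letter : String) : String :=
  let s := PySem.Int.toStr row
  (if PySem.Str.len s < 2 then String.ofList ('0' :: s.toList) else s) ++ letter

-- ===== PORT A =====
-- the inner `for letter in letter_order` with its break (once len ≥ total it stays ≥ total,
-- so the break is the same as skipping each remaining letter)
def pvInnerA (total : Int) (row : Int) (seats : List String) : List String :=
  ["A", "C", "F"].foldl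
    (fun sn letter => if total ≤ (sn.length : Int) then sn else sn ++ [pvFmt02 row letter]) seats

theorem pvInnerA_len_gt (total row : Int) (seats : List String)
    (h : (seats.length : Int) < total) : seats.length < (pvInnerA total row seats).length := by
  simp only [pvInnerA, List.foldl]
  split_ifs <;> simp_all
  all_goals omega

-- the outer `while len(seat_numbers) < total_seats`
def pvLoopA (total : Int) (seats : List String) (row : Int) : List String :=
  if h : (seats.length : Int) < total then
    pvLoopA total (pvInnerA total row seats) (row + 1)
  else seats
termination_by (total - seats.length).toNat
decreasing_by
  have := pvInnerA_len_gt total row seats h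
  omega

def generate_business_seat_numbers (total_seats : Int) : List String :=
  PySem.List.slice (pvLoopA total_seats [] 1) none (some total_seats)

-- ===== PORT B =====
def generate_business_seat_numbers_alt (total_seats : Int) : List String :=
  (PySem.List.pyRange 0 total_seats 1).map (fun i =>
    pvFmt02 (PySem.Int.floordiv i 3 + 1)
      (PySem.List.pyGetD ["A", "C", "F"] (PySem.Int.mod i 3) ""))

-- ===== PRECONDITION & SPEC =====
def Spec_generate_business_seat_numbers (total_seats : Int) (out : List String) : Prop := out = generate_business_seat_numbers_alt total_seats
instance (total_seats : Int) (out : List String) : Decidable (Spec_generate_business_seat_numbers total_seats out) := by unfold Spec_generate_business_seat_numbers; infer_instance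

-- ===== CLAIM (what is proved, stated in full; the proofs are below) =====
def Claim_equal_generate_business_seat_numbers : Prop := ∀ (total_seats : Int), Dom_generate_business_seat_numbers total_seats → Spec_generate_business_seat_numbers total_seats (generate_business_seat_numbers total_seats)

-- ===== LEMMAS AND PROOFS =====

-- B's per-seat label as a named function (definitionally the lambda in the B port)
def pvG (i : Int) : String :=
  pvFmt02 (PySem.Int.floordiv i 3 + 1)
    (PySem.List.pyGetD ["A", "C", "F"] (PySem.Int.mod i 3) "")

theorem pvG_eval (k c : Nat) (hc : c < 3) :
    pvG ((3 * k + c : Nat) : Int) = pvFmt02 ((k : Int) + 1) (["A", "C", "F"].getD c "") := by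
  unfold pvG
  have hf : PySem.Int.floordiv ((3 * k + c : Nat) : Int) 3 = (((3 * k + c) / 3 : Nat) : Int) := by
    exact_mod_cast PySem.Int.floordiv_natCast (3 * k + c) 3
  have hm : PySem.Int.mod ((3 * k + c : Nat) : Int) 3 = (((3 * k + c) % 3 : Nat) : Int) := by
    exact_mod_cast PySem.Int.mod_natCast (3 * k + c) 3
  have h1 : (3 * k + c) / 3 = k := by omega
  have h2 : (3 * k + c) % 3 = c := by omega
  rw [hf, hm, h1, h2]
  interval_cases c <;> simp [PySem.List.pyGetD, PySem.List.pyGet?, PySem.List.pyIdx?]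



theorem pvLoopA_eq (total : Int) (N : Nat) :
    ∀ (k : Nat) (seats : List String), (total - 3 * k).toNat = N → seats.length = 3 * k →
    pvLoopA total seats ((k : Int) + 1)
      = seats ++ (PySem.List.pyRange (seats.length : Int) total 1).map pvG := by
  induction N using Nat.strong_induction_on with
  | _ N IH =>
    intro k seats hN hlen
    rw [pvLoopA]
    by_cases h : ((seats.length : Int) < total)
    · rw [dif_pos h]
      have hlenI : (seats.length : Int) = ((3 * k : Nat) : Int) := by simp [hlen]
      have c0 : ¬ (total ≤ (seats.length : Int)) := by omega
      have g0 : pvG (3 * (k : Int)) = pvFmt02 ((k : Int) + 1) "A" := by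
        rw [show 3 * (k : Int) = ((3 * k : Nat) : Int) by push_cast; ring]
        simpa using pvG_eval k 0 (by omega)
      have g1 : pvG (3 * (k : Int) + 1) = pvFmt02 ((k : Int) + 1) "C" := by
        rw [show 3 * (k : Int) + 1 = ((3 * k + 1 : Nat) : Int) by push_cast; ring]
        simpa using pvG_eval k 1 (by omega)
      have g2 : pvG (3 * (k : Int) + 2) = pvFmt02 ((k : Int) + 1) "F" := by
        rw [show 3 * (k : Int) + 2 = ((3 * k + 2 : Nat) : Int) by push_cast; ring]
        simpa using pvG_eval k 2 (by omega)
      by_cases h3 : ((3 * k : Nat) : Int) + 3 ≤ total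
      · -- at least a full row remains: all three letters are appended
        have c1 : ¬ (total ≤ ((seats ++ [pvFmt02 ((k : Int) + 1) "A"]).length : Int)) := by
          simp only [List.length_append, List.length_cons, List.length_nil, hlen]
          push_cast at h3 ⊢; omega
        have c2 : ¬ (total ≤ ((seats ++ [pvFmt02 ((k : Int) + 1) "A"]
            ++ [pvFmt02 ((k : Int) + 1) "C"]).length : Int)) := by
          simp only [List.length_append, List.length_cons, List.length_nil, hlen]
          push_cast at h3 ⊢; omega
        have e1 : pvInnerA total ((k : Int) + 1) seats
            = seats ++ [pvFmt02 ((k : Int) + 1) "A", pvFmt02 ((k : Int) + 1) "C",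
                        pvFmt02 ((k : Int) + 1) "F"] := by
          simp only [pvInnerA, List.foldl]
          rw [if_neg c0, if_neg c1, if_neg c2]
          simp
        have hcast : ((k : Int) + 1) + 1 = (((k + 1 : Nat)) : Int) + 1 := by push_cast; ring
        have hlen' : (seats ++ [pvFmt02 ((k : Int) + 1) "A", pvFmt02 ((k : Int) + 1) "C",
            pvFmt02 ((k : Int) + 1) "F"]).length = 3 * (k + 1) := by
          simp only [List.length_append, List.length_cons, List.length_nil, hlen]; omega
        have hNlt : (total - 3 * (k + 1)).toNat < N := by
          push_cast at h3 hlenI ⊢; omega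
        rw [hcast, e1, IH _ hNlt (k + 1) _ rfl hlen']
        have hl2 : ((seats ++ [pvFmt02 ((k : Int) + 1) "A", pvFmt02 ((k : Int) + 1) "C",
            pvFmt02 ((k : Int) + 1) "F"]).length : Int) = ((3 * k : Nat) : Int) + 3 := by
          simp only [List.length_append, List.length_cons, List.length_nil, hlen]
          push_cast; ring
        have hb0 : ((3 * k : Nat) : Int) < total := by omega
        have hb1 : ((3 * k : Nat) : Int) + 1 < total := by omega
        have hb2 : ((3 * k : Nat) : Int) + 1 + 1 < total := by omega
        rw [hl2, hlenI,
            PySem.List.pyRange_one_cons hb0, PySem.List.pyRange_one_cons hb1,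
            PySem.List.pyRange_one_cons hb2,
            show ((3 * k : Nat) : Int) + 1 + 1 = ((3 * k : Nat) : Int) + 2 by ring,
            show ((3 * k : Nat) : Int) + 2 + 1 = ((3 * k : Nat) : Int) + 3 by ring]
        simp [g0, g1, g2]
      · -- fewer than 3 seats remain: the break fires, then the loop exits
        have htot : total = ((3 * k : Nat) : Int) + 1 ∨ total = ((3 * k : Nat) : Int) + 2 := by
          rw [hlenI] at h; omega
        rcases htot with ht | ht
        · have c1 : total ≤ ((seats ++ [pvFmt02 ((k : Int) + 1) "A"]).length : Int) := by
            simp only [List.length_append, List.length_cons, List.length_nil, hlen, ht]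
            push_cast; omega
          have e1 : pvInnerA total ((k : Int) + 1) seats
              = seats ++ [pvFmt02 ((k : Int) + 1) "A"] := by
            simp only [pvInnerA, List.foldl]
            rw [if_neg c0]
            simp only [if_pos c1]
          rw [e1, pvLoopA, dif_neg (by
            simp only [List.length_append, List.length_cons, List.length_nil, hlen, ht]
            push_cast; omega)]
          rw [hlenI, ht, PySem.List.pyRange_one_singleton]
          simp [g0]
        · have c1 : ¬ (total ≤ ((seats ++ [pvFmt02 ((k : Int) + 1) "A"]).length : Int)) := by
            simp only [List.length_append, List.length_cons, List.length_nil, hlen, ht]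
            push_cast; omega
          have c2 : total ≤ ((seats ++ [pvFmt02 ((k : Int) + 1) "A"]
              ++ [pvFmt02 ((k : Int) + 1) "C"]).length : Int) := by
            simp only [List.length_append, List.length_cons, List.length_nil, hlen, ht]
            push_cast; omega
          have e1 : pvInnerA total ((k : Int) + 1) seats
              = seats ++ [pvFmt02 ((k : Int) + 1) "A", pvFmt02 ((k : Int) + 1) "C"] := by
            simp only [pvInnerA, List.foldl]
            rw [if_neg c0, if_neg c1, if_pos c2]
            simp
          rw [e1, pvLoopA, dif_neg (by
            simp only [List.length_append, List.length_cons, List.length_nil, hlen, ht]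
            push_cast; omega)]
          rw [hlenI, ht,
              show ((3 * k : Nat) : Int) + 2 = (((3 * k : Nat) : Int) + 1) + 1 by ring,
              PySem.List.pyRange_one_cons (by omega), PySem.List.pyRange_one_singleton]
          simp [g0, g1]
    · rw [dif_neg h]
      rw [PySem.List.pyRange_one_eq_nil (by omega)]
      simp

-- ===== VERDICT (by name: the statement is the Claim_ definition above) =====
theorem generate_business_seat_numbers_spec : Claim_equal_generate_business_seat_numbers := by
  intro total _
  unfold Spec_generate_business_seat_numbers generate_business_seat_numbers
  have hA : pvLoopA total [] 1 = (PySem.List.pyRange 0 total 1).map pvG := by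
    simpa using pvLoopA_eq total (total - 3 * 0).toNat 0 [] rfl rfl
  have halt : generate_business_seat_numbers_alt total = (PySem.List.pyRange 0 total 1).map pvG := rfl
  rw [hA, halt]
  by_cases h : 0 ≤ total
  · rw [PySem.List.slice_to _ h]
    apply List.take_of_length_le
    simp [PySem.List.length_pyRange_one]
  · rw [PySem.List.pyRange_one_eq_nil (by omega)]
    exact List.eq_nil_iff_forall_not_mem.2 fun x hx => by
      simpa using PySem.List.mem_of_mem_slice _ _ _ hx
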